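-- pv_equiv track=rewrite | github.com/jsgoller1/algorithms | cses/1755/1755.py | handleEven
-- ===== SOURCE A (Python) =====
-- import collections
--
-- def handleEven(cntr, oddCounts):
--     if oddCounts:
--         return "NO SOLUTION"
--     result = collections.deque()
--     for letter, letterct in cntr.items():
--         while letterct > 0:
--             result.appendleft(letter)
--             result.append(letter)
--             letterct -= 2
--     return "".join(result)
-- ===== SOURCE B (Python) =====
-- def handleEven(cntr, oddCounts):
--     if oddCounts:
--         return "NO SOLUTION"
--     parts = [letter * ((ct + 1) // 2) for letter, ct in cntr.items()]
--     return "".join(parts[::-1] + parts)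
-- ===== Notes on version B (the rewrite author's own statement) =====
-- stated objective: simpler
-- what changed: Replaces the deque with symmetric appendleft/append inside a while-loop by a comprehension computing each letter's half-count ceil(ct/2) in closed form, then mirroring the list of pieces and joining once.
import Mathlib
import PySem

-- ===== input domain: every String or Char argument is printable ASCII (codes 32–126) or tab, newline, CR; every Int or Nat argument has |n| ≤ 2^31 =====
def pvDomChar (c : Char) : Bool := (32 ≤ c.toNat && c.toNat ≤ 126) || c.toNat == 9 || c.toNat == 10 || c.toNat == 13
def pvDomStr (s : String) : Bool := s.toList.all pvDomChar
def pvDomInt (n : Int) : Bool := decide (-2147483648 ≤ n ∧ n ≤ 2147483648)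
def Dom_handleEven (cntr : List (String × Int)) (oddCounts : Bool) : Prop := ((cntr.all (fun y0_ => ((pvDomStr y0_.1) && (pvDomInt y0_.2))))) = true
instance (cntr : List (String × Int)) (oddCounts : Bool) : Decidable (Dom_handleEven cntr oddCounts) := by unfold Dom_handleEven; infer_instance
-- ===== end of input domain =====

-- B replaces the deque with its symmetric appendleft/append while-loop by computing each
-- letter's half-count ceil(ct/2) in closed form, mirroring the list of pieces and joining once (objective: simpler).

-- ===== PORT A =====
-- the inner 'while letterct > 0: appendleft; append; letterct -= 2' loop; the deque is a List String
def pvWhile (letter : String) (ct : Int) (res : List String) : List String :=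
  if 0 < ct then pvWhile letter (ct - 2) (letter :: res ++ [letter]) else res
  termination_by ct.toNat
  decreasing_by omega

def handleEven (cntr : List (String × Int)) (oddCounts : Bool) : String :=
  if oddCounts then "NO SOLUTION"
  else PySem.Str.join "" (cntr.foldl (fun res p => pvWhile p.1 p.2 res) [])

-- ===== PORT B =====
-- exact port of Python's str * int (a negative count gives "")
def pvStrMul (s : String) (n : Int) : String := PySem.Str.join "" (List.replicate n.toNat s)

def handleEven_alt (cntr : List (String × Int)) (oddCounts : Bool) : String :=
  if oddCounts then "NO SOLUTION"
  else
    let parts := cntr.map (fun p => pvStrMul p.1 (PySem.Int.floordiv (p.2 + 1) 2))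
    -- parts[::-1] is List.reverse (PySem.List.slice?_none_none_neg_one)
    PySem.Str.join "" (parts.reverse ++ parts)

-- ===== PRECONDITION & SPEC =====
def Spec_handleEven (cntr : List (String × Int)) (oddCounts : Bool) (out : String) : Prop := out = handleEven_alt cntr oddCounts
instance (cntr : List (String × Int)) (oddCounts : Bool) (out : String) : Decidable (Spec_handleEven cntr oddCounts out) := by unfold Spec_handleEven; infer_instance

-- ===== CLAIM (what is proved, stated in full; the proofs are below) =====
def Claim_equal_handleEven : Prop := ∀ (cntr : List (String × Int)) (oddCounts : Bool), Dom_handleEven cntr oddCounts → Spec_handleEven cntr oddCounts (handleEven cntr oddCounts)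

-- ===== LEMMAS AND PROOFS =====
-- number of iterations of the while loop = ceil(ct/2), clamped at 0
def pvK (c : Int) : Nat := (PySem.Int.floordiv (c + 1) 2).toNat

theorem pvJoin_nil_flatten (s : List (List Char)) : PySem.Chars.join [] s = s.flatten := by
  show List.intercalate [] s = s.flatten
  induction s with
  | nil => simp [List.intercalate]
  | cons h t ih =>
    cases t with
    | nil => simp [List.intercalate]
    | cons h2 t2 =>
      simp only [List.intercalate, List.intersperse] at *
      simp_all

theorem pvK_pos {c : Int} (h : 0 < c) : pvK c = pvK (c - 2) + 1 := by
  show (Int.fdiv (c + 1) 2).toNat = (Int.fdiv (c - 2 + 1) 2).toNat + 1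
  rw [Int.fdiv_eq_ediv, Int.fdiv_eq_ediv] <;> omega

theorem pvWhile_eq (l : String) (c : Int) (res : List String) :
    pvWhile l c res = List.replicate (pvK c) l ++ res ++ List.replicate (pvK c) l := by
  by_cases h : 0 < c
  · rw [pvWhile.eq_def]
    simp only [h, if_true]
    rw [pvWhile_eq l (c - 2), pvK_pos h]
    nth_rewrite 2 [List.replicate_succ]
    rw [List.replicate_succ']
    simp [List.append_assoc]
  · rw [pvWhile.eq_def]
    simp only [h, if_false]
    have : pvK c = 0 := by
      show (Int.fdiv (c + 1) 2).toNat = 0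
      rw [Int.fdiv_eq_ediv] <;> omega
    simp [this]
  termination_by c.toNat
  decreasing_by omega

def pvRep (p : String × Int) : List String := List.replicate (pvK p.2) p.1

theorem pvFold_eq (xs : List (String × Int)) (acc : List String) :
    xs.foldl (fun res p => pvWhile p.1 p.2 res) acc
      = (xs.reverse.map pvRep).flatten ++ acc ++ (xs.map pvRep).flatten := by
  induction xs generalizing acc with
  | nil => simp
  | cons h t ih =>
    rw [List.foldl_cons, ih, pvWhile_eq]
    simp only [List.reverse_cons, List.map_append, List.map_cons, List.map_nil,
      List.flatten_append, List.flatten_cons, List.flatten_nil]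
    simp [pvRep, List.append_assoc]

theorem pvFlatMapFlat {α : Type} (g : α → List String) (xs : List α) :
    (((xs.map g).flatten).map String.toList).flatten
      = (xs.map (fun x => (((g x).map String.toList)).flatten)).flatten := by
  induction xs with
  | nil => simp
  | cons h t ih => simp_all

theorem pvRep_toList (p : String × Int) :
    ((pvRep p).map String.toList).flatten
      = (pvStrMul p.1 (PySem.Int.floordiv (p.2 + 1) 2)).toList := by
  simp [pvRep, pvStrMul, pvJoin_nil_flatten, pvK, List.map_replicate]

-- ===== VERDICT (by name: the statement is the Claim_ definition above) =====
theorem handleEven_spec : Claim_equal_handleEven := by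
  intro cntr oddCounts _
  show handleEven cntr oddCounts = handleEven_alt cntr oddCounts
  unfold handleEven handleEven_alt
  cases oddCounts with
  | true => rfl
  | false =>
    simp only [if_false, Bool.false_eq_true]
    apply String.toList_inj.mp
    rw [pvFold_eq]
    simp only [PySem.Str.toList_join, pvJoin_nil_flatten, String.toList_empty,
      List.map_append, List.flatten_append, List.append_nil]
    rw [pvFlatMapFlat, pvFlatMapFlat, ← List.map_reverse]
    simp [pvRep_toList, Function.comp_def]
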